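-- pv_equiv track=rewrite | github.com/svinter/dashy | app/backend/connectors/note_creator.py | _build_client_lookups
-- ===== SOURCE A (Python) =====
-- _COMPANY_LAST_WORDS = frozenset([
--     'insights', 'tech', 'ai', 'lab', 'labs', 'inc', 'llc', 'corp', 'group',
--     'services', 'solutions', 'team', 'health', 'agi', 'continua', 'labcentral',
--     'artyfact', 'maven', 'layer', 'partners', 'ventures', 'studio', 'works',
-- ])
--
-- def _looks_like_person(name: str) -> bool:
--     """Return True if the name looks like 'Firstname Lastname' rather than a company/org name."""
--     words = name.strip().split()
--     if len(words) != 2: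
--         return False
--     last = words[1].lower()
--     return last not in _COMPANY_LAST_WORDS
--
-- def _build_client_lookups(clients: list[dict]) -> tuple[dict, dict]:
--     """Return (by_full_name, by_first_name) dicts mapping lowercase → client row.
--
--     by_first_name only includes entries where the first name is unique among
--     person-looking clients (two-word names whose second word isn't a company noun).
--     """
--     by_full: dict[str, dict] = {}
--     first_counts: dict[str, int] = {}
--     by_first: dict[str, dict] = {}
--
--     for c in clients:
--         name = (c.get("name") or "").strip()
--         if not name:
--             continue
--         by_full[name.lower()] = c
--         if _looks_like_person(name):
--             first = name.split()[0].lower()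
--             first_counts[first] = first_counts.get(first, 0) + 1
--
--     for c in clients:
--         name = (c.get("name") or "").strip()
--         if not name or not _looks_like_person(name):
--             continue
--         first = name.split()[0].lower()
--         if first_counts[first] == 1:
--             by_first[first] = c
--
--     return by_full, by_first
-- ===== SOURCE B (Python) =====
-- _COMPANY_LAST_WORDS = frozenset([
--     'insights', 'tech', 'ai', 'lab', 'labs', 'inc', 'llc', 'corp', 'group',
--     'services', 'solutions', 'team', 'health', 'agi', 'continua', 'labcentral',
--     'artyfact', 'maven', 'layer', 'partners', 'ventures', 'studio', 'works',
-- ])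
--
--
-- def _is_person(name: str) -> bool:
--     parts = name.strip().split()
--     return len(parts) == 2 and parts[1].lower() not in _COMPANY_LAST_WORDS
--
--
-- def _build_client_lookups(clients: list[dict]) -> tuple[dict, dict]:
--     """Single pass: build by_full and a first-name -> clients index, then keep
--     the unique-first-name entries of the index."""
--     by_full: dict[str, dict] = {}
--     index: dict[str, list] = {}
--
--     for c in clients:
--         name = (c.get("name") or "").strip()
--         if not name:
--             continue
--         by_full[name.lower()] = c
--         if _is_person(name):
--             index.setdefault(name.split()[0].lower(), []).append(c)
--
--     by_first = {first: group[0] for first, group in index.items() if len(group) == 1}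
--     return by_full, by_first
-- ===== Notes on version B (the rewrite author's own statement) =====
-- stated objective: alternative
-- what changed: A makes two passes over clients (count first names, then rescan all clients to pick the unique ones); B makes a single pass that groups clients into a first-name -> list index and then keeps the singleton groups of that index.
import Mathlib
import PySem

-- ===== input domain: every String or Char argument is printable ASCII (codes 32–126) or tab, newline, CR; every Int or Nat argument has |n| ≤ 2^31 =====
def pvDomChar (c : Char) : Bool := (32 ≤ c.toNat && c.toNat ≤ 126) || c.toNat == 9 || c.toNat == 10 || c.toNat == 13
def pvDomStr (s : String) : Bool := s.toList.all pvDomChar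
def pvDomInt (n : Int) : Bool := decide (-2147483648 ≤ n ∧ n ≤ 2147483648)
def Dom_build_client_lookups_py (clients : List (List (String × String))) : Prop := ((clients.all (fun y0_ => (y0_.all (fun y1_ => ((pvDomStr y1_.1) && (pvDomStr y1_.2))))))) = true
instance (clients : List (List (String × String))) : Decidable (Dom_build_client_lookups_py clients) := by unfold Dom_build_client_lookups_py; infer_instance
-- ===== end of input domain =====

-- B replaces A's count-then-rescan two-pass structure by one pass that groups clients by
-- first name and then filters the singleton groups (objective: alternative decomposition).

-- ===== PORT A =====
def pyCompanyLastWords : List String :=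
  ["insights", "tech", "ai", "lab", "labs", "inc", "llc", "corp", "group",
   "services", "solutions", "team", "health", "agi", "continua", "labcentral",
   "artyfact", "maven", "layer", "partners", "ventures", "studio", "works"]

def pyLooksLikePerson (name : String) : Bool :=
  let words := PySem.Str.split₀ (PySem.Str.strip name)
  if words.length ≠ 2 then false
  else !(pyCompanyLastWords.contains (PySem.Str.lower (words.getD 1 "")))

def build_client_lookups_py (clients : List (List (String × String))) :
    (List (String × List (String × String))) × (List (String × List (String × String))) :=
  -- first loop: by_full and first_counts (a pair state)
  let s := clients.foldl
    (fun (s : PySem.Dict String (List (String × String)) × PySem.Dict String Int) c =>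
      let name := PySem.Str.strip (((PySem.Dict.ofList c).get? "name").getD "")
      if name == "" then s
      else
        let byFull := s.1.insert (PySem.Str.lower name) c
        if pyLooksLikePerson name then
          -- name.split()[0]: name is nonempty here, so index 0 exists; getD is exact
          let first := PySem.Str.lower ((PySem.Str.split₀ name).getD 0 "")
          (byFull, s.2.insert first (s.2.getD first 0 + 1))
        else (byFull, s.2))
    (PySem.Dict.empty, PySem.Dict.empty)
  -- second loop: by_first
  let byFirst := clients.foldl
    (fun (bf : PySem.Dict String (List (String × String))) c =>
      let name := PySem.Str.strip (((PySem.Dict.ofList c).get? "name").getD "")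
      if name == "" || !pyLooksLikePerson name then bf
      else
        let first := PySem.Str.lower ((PySem.Str.split₀ name).getD 0 "")
        -- first_counts[first]: the key was inserted in the first loop, so getD is exact
        if s.2.getD first 0 == 1 then bf.insert first c else bf)
    PySem.Dict.empty
  (s.1.items, byFirst.items)

-- ===== PORT B =====
def altIsPerson (name : String) : Bool :=
  match PySem.Str.split₀ (PySem.Str.strip name) with
  | [_, w2] => !(pyCompanyLastWords.contains (PySem.Str.lower w2))
  | _ => false

def build_client_lookups_py_alt (clients : List (List (String × String))) :
    (List (String × List (String × String))) × (List (String × List (String × String))) :=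
  -- single pass: by_full and the first-name -> clients index
  let s := clients.foldl
    (fun (s : PySem.Dict String (List (String × String)) ×
              PySem.Dict String (List (List (String × String)))) c =>
      let name := PySem.Str.strip (((PySem.Dict.ofList c).get? "name").getD "")
      if name == "" then s
      else
        let byFull := s.1.insert (PySem.Str.lower name) c
        if altIsPerson name then
          -- index.setdefault(first, []).append(c)
          (byFull, s.2.modify (PySem.Str.lower ((PySem.Str.split₀ name).getD 0 "")) [] (· ++ [c]))
        else (byFull, s.2))
    (PySem.Dict.empty, PySem.Dict.empty)
  -- keep the singleton groups of the index
  let byFirst := s.2.items.filterMap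
    (fun fg => match fg.2 with
      | [c] => some (fg.1, c)
      | _ => none)
  (s.1.items, byFirst)

-- ===== PRECONDITION & SPEC =====
def Spec_build_client_lookups_py (clients : List (List (String × String))) (out : (List (String × List (String × String))) × (List (String × List (String × String)))) : Prop := out = build_client_lookups_py_alt clients
instance (clients : List (List (String × String))) (out : (List (String × List (String × String))) × (List (String × List (String × String)))) : Decidable (Spec_build_client_lookups_py clients out) := by unfold Spec_build_client_lookups_py; infer_instance

-- ===== CLAIM (what is proved, stated in full; the proofs are below) =====
def Claim_equal_build_client_lookups_py : Prop := ∀ (clients : List (List (String × String))), Dom_build_client_lookups_py clients → Spec_build_client_lookups_py clients (build_client_lookups_py clients)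

-- ===== LEMMAS AND PROOFS =====

-- Proof-local abbreviations for the values both ports compute from a client row
def pvName (c : List (String × String)) : String :=
  PySem.Str.strip (((PySem.Dict.ofList c).get? "name").getD "")

def pvFirst (c : List (String × String)) : String :=
  PySem.Str.lower ((PySem.Str.split₀ (pvName c)).getD 0 "")

def pvKeep (c : List (String × String)) : Bool :=
  !(pvName c == "") && pyLooksLikePerson (pvName c)

def pvFullF (bf : PySem.Dict String (List (String × String))) (c : List (String × String)) :
    PySem.Dict String (List (String × String)) :=
  if pvName c == "" then bf else bf.insert (PySem.Str.lower (pvName c)) c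

def pvCntF (d : PySem.Dict String Int) (c : List (String × String)) : PySem.Dict String Int :=
  if pvKeep c then d.insert (pvFirst c) (d.getD (pvFirst c) 0 + 1) else d

def pvIdxF (d : PySem.Dict String (List (List (String × String)))) (c : List (String × String)) :
    PySem.Dict String (List (List (String × String))) :=
  if pvKeep c then d.modify (pvFirst c) [] (· ++ [c]) else d

-- the two person tests agree
lemma pv_person_eq (n : String) : altIsPerson n = pyLooksLikePerson n := by
  unfold altIsPerson pyLooksLikePerson
  rcases h : PySem.Str.split₀ (PySem.Str.strip n) with _ | ⟨a, _ | ⟨b, _ | ⟨x, t⟩⟩⟩ <;>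
    simp [List.getD]

-- A's first loop is the pair of the two independent folds
lemma pv_foldA (clients : List (List (String × String)))
    (bf : PySem.Dict String (List (String × String))) (d : PySem.Dict String Int) :
    clients.foldl
      (fun (s : PySem.Dict String (List (String × String)) × PySem.Dict String Int) c =>
        let name := PySem.Str.strip (((PySem.Dict.ofList c).get? "name").getD "")
        if name == "" then s
        else
          let byFull := s.1.insert (PySem.Str.lower name) c
          if pyLooksLikePerson name then
            let first := PySem.Str.lower ((PySem.Str.split₀ name).getD 0 "")
            (byFull, s.2.insert first (s.2.getD first 0 + 1))
          else (byFull, s.2)) (bf, d)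
    = (clients.foldl pvFullF bf, clients.foldl pvCntF d) := by
  induction clients generalizing bf d with
  | nil => rfl
  | cons c t ih =>
    simp only [List.foldl_cons]
    rw [← ih]
    congr 1
    show _ = (pvFullF bf c, pvCntF d c)
    simp only [pvFullF, pvCntF, pvKeep, pvFirst, pvName]
    by_cases h1 : PySem.Str.strip (((PySem.Dict.ofList c).get? "name").getD "") == ""
    · simp [h1]
    · by_cases h2 : pyLooksLikePerson (PySem.Str.strip (((PySem.Dict.ofList c).get? "name").getD ""))
      · simp [h1, h2]
      · simp [h1, h2]

-- B's loop is the pair of the two independent folds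
lemma pv_foldB (clients : List (List (String × String)))
    (bf : PySem.Dict String (List (String × String)))
    (d : PySem.Dict String (List (List (String × String)))) :
    clients.foldl
      (fun (s : PySem.Dict String (List (String × String)) ×
                PySem.Dict String (List (List (String × String)))) c =>
        let name := PySem.Str.strip (((PySem.Dict.ofList c).get? "name").getD "")
        if name == "" then s
        else
          let byFull := s.1.insert (PySem.Str.lower name) c
          if altIsPerson name then
            (byFull, s.2.modify (PySem.Str.lower ((PySem.Str.split₀ name).getD 0 "")) [] (· ++ [c]))
          else (byFull, s.2)) (bf, d)
    = (clients.foldl pvFullF bf, clients.foldl pvIdxF d) := by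
  induction clients generalizing bf d with
  | nil => rfl
  | cons c t ih =>
    simp only [List.foldl_cons]
    rw [← ih]
    congr 1
    show _ = (pvFullF bf c, pvIdxF d c)
    simp only [pvFullF, pvIdxF, pvKeep, pvFirst, pvName, pv_person_eq]
    by_cases h1 : PySem.Str.strip (((PySem.Dict.ofList c).get? "name").getD "") == ""
    · simp [h1]
    · by_cases h2 : pyLooksLikePerson (PySem.Str.strip (((PySem.Dict.ofList c).get? "name").getD ""))
      · simp [h1, h2]
      · simp [h1, h2]

-- the counts dict looks up the number of kept clients with that first name
lemma pv_cnt_getD (clients : List (List (String × String))) (k : String) :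
    (clients.foldl pvCntF PySem.Dict.empty).getD k 0
      = (((clients.filter pvKeep).map pvFirst).count k : Int) := by
  unfold pvCntF
  rw [PySem.List.foldl_if_eq_foldl_filter]
  rw [show (fun (d : PySem.Dict String Int) c =>
        d.insert (pvFirst c) (d.getD (pvFirst c) 0 + 1))
      = (fun d c => (fun (d : PySem.Dict String Int) x => d.insert x (d.getD x 0 + 1)) d (pvFirst c))
      from rfl]
  rw [← List.foldl_map (f := pvFirst)
        (g := fun (d : PySem.Dict String Int) x => d.insert x (d.getD x 0 + 1))]
  rw [PySem.Dict.getD_foldl_insert_add_one]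
  simp [PySem.Dict.getD_empty]

-- the index dict groups the kept clients by first name
lemma pv_idx_getD (clients : List (List (String × String))) (k : String) :
    (clients.foldl pvIdxF PySem.Dict.empty).getD k []
      = (clients.filter pvKeep).filter (fun c => pvFirst c == k) := by
  unfold pvIdxF
  rw [PySem.List.foldl_if_eq_foldl_filter]
  rw [show (fun (d : PySem.Dict String (List (List (String × String)))) c =>
        d.modify (pvFirst c) [] (· ++ [c]))
      = (fun d c => (fun (d : PySem.Dict String (List (List (String × String)))) p =>
            d.modify p.1 [] (fun x => x ++ [p.2])) d ((fun c => (pvFirst c, c)) c))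
      from rfl]
  rw [← List.foldl_map (f := fun c => (pvFirst c, c))
        (g := fun (d : PySem.Dict String (List (List (String × String)))) p =>
          d.modify p.1 [] (fun x => x ++ [p.2]))]
  rw [PySem.Dict.getD_foldl_modify_append]
  simp [List.filter_map, List.map_map, Function.comp_def]

lemma pv_idx_keys (clients : List (List (String × String))) :
    (clients.foldl pvIdxF PySem.Dict.empty).keys
      = PySem.Set.ofList ((clients.filter pvKeep).map pvFirst) := by
  unfold pvIdxF
  rw [PySem.List.foldl_if_eq_foldl_filter]
  rw [show (fun (d : PySem.Dict String (List (List (String × String)))) c =>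
        d.modify (pvFirst c) [] (· ++ [c]))
      = (fun d c => d.modify (pvFirst c) [] ((fun (_ : PySem.Dict String (List (List (String × String)))) (c : List (String × String)) (x : List (List (String × String))) => x ++ [c]) d c))
      from rfl]
  rw [PySem.Dict.keys_foldl_modify_key]
  simp [PySem.Dict.keys_empty, PySem.Set.update_nil_left]

lemma pv_idx_nodup (clients : List (List (String × String))) :
    (clients.foldl pvIdxF PySem.Dict.empty).keys.Nodup := by
  rw [pv_idx_keys]
  exact PySem.Set.nodup_ofList _

-- the kept clients with a globally unique first name have distinct first names
lemma pv_uniq_nodup (L : List (List (String × String))) :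
    ((L.filter (fun c => (L.map pvFirst).count (pvFirst c) == 1)).map pvFirst).Nodup := by
  rw [List.nodup_iff_count_le_one]
  intro a
  by_cases ha : a ∈ (L.filter (fun c => (L.map pvFirst).count (pvFirst c) == 1)).map pvFirst
  · rcases List.mem_map.1 ha with ⟨c, hc, rfl⟩
    rcases List.mem_filter.1 hc with ⟨_, hcnt⟩
    have h1 : (L.map pvFirst).count (pvFirst c) = 1 := by simpa using hcnt
    calc List.count (pvFirst c) ((L.filter (fun c => (L.map pvFirst).count (pvFirst c) == 1)).map pvFirst)
        ≤ List.count (pvFirst c) (L.map pvFirst) :=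
          List.Sublist.count_le _ (List.Sublist.map _ (List.filter_sublist))
      _ = 1 := h1
  · simp [List.count_eq_zero.2 ha]

-- the singleton-group selector both final shapes are phrased with
def pvSingle {κ α : Type} [BEq κ] (L : List α) (f : α → κ) (k : κ) : Option (κ × α) :=
  match L.filter (fun c => f c == k) with
  | [c] => some (k, c)
  | _ => none

-- killing one key of a key-preserving filterMap function filters that key out
lemma pv_filterMap_kill {κ α : Type} [BEq κ] [LawfulBEq κ] (k₀ : κ)
    (g g' : κ → Option (κ × α))
    (h1 : ∀ k, ¬ k = k₀ → g' k = g k) (h2 : g' k₀ = none)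
    (h3 : ∀ k p, g k = some p → p.1 = k) (s : List κ) :
    s.filterMap g' = (s.filterMap g).filter (fun p => !(p.1 == k₀)) := by
  induction s with
  | nil => simp
  | cons k t ih =>
    by_cases hk : k = k₀
    · subst hk
      rw [List.filterMap_cons, h2, List.filterMap_cons]
      cases hg : g k with
      | none => simpa using ih
      | some p =>
        have hp := h3 _ _ hg
        simp [hp, ih]
    · rw [List.filterMap_cons, h1 k hk, List.filterMap_cons]
      cases hg : g k with
      | none => simpa using ih
      | some p =>
        have hp := h3 _ _ hg
        simp [hp, hk, ih]

-- CORE: filtering the singleton groups of the first-occurrence grouping equals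
-- keeping the elements whose key is globally unique
lemma pv_core {κ α : Type} [BEq κ] [LawfulBEq κ] (f : α → κ) (L : List α) :
    (PySem.Set.ofList (L.map f)).filterMap (pvSingle L f)
      = (L.filter (fun c => (L.map f).count (f c) == 1)).map (fun c => (f c, c)) := by
  induction L using List.reverseRecOn with
  | nil => simp
  | append_singleton L c ih =>
    have hmap : (L ++ [c]).map f = L.map f ++ [f c] := by simp
    rw [hmap, PySem.Set.ofList_append_singleton]
    by_cases hmem : f c ∈ L.map f
    · -- the new key was already present: its group stops being a singleton
      rw [PySem.Set.add_of_mem ((PySem.Set.mem_ofList _ _).2 hmem)]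
      have hkill :
          (PySem.Set.ofList (L.map f)).filterMap (pvSingle (L ++ [c]) f)
            = ((PySem.Set.ofList (L.map f)).filterMap (pvSingle L f)).filter
                (fun p => !(p.1 == f c)) := by
        apply pv_filterMap_kill
        · intro k hk
          unfold pvSingle
          have : (L ++ [c]).filter (fun c' => f c' == k) = L.filter (fun c' => f c' == k) := by
            rw [List.filter_append]
            have : (f c == k) = false := by
              simp only [beq_eq_false_iff_ne, ne_eq]
              intro h; exact hk h.symm
            simp [this]
          rw [this]
        · rcases List.mem_map.1 hmem with ⟨x, hx, hfx⟩
          have hne : L.filter (fun c' => f c' == f c) ≠ [] := by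
            intro h
            have := List.filter_eq_nil_iff.1 h x hx
            simp [hfx] at this
          rcases hfil : L.filter (fun c' => f c' == f c) with _ | ⟨y, ys⟩
          · exact absurd hfil hne
          · unfold pvSingle
            rw [List.filter_append, hfil]
            simp
        · intro k p h
          unfold pvSingle at h
          rcases hfil : L.filter (fun c' => f c' == k) with _ | ⟨y, _ | ⟨z, t⟩⟩ <;>
            rw [hfil] at h <;> simp at h
          rw [← h]
      rw [hkill, ih, List.filter_append]
      have hc1 : 0 < List.count (f c) (List.map f L) := List.count_pos_iff.2 hmem
      have hone : List.filter (fun c' => List.count (f c') (List.map f L ++ [f c]) == 1) [c] = [] := by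
        have h2 : (List.count (f c) (List.map f L ++ [f c]) == 1) = false := by
          simp only [beq_eq_false_iff_ne, ne_eq, List.count_append, List.count_cons,
            List.count_nil, BEq.rfl, if_true]
          omega
        simp
        omega
      rw [hone, List.append_nil]
      have hcong : List.filter (fun c' => List.count (f c') (List.map f L ++ [f c]) == 1) L
          = List.filter (fun c' => (!(f c' == f c)) && (List.count (f c') (List.map f L) == 1)) L := by
        apply List.filter_congr
        intro x _
        by_cases hfc : f x = f c
        · have hp : 0 < List.count (f x) (List.map f L) := by rw [hfc]; exact hc1
          have hb : (f c == f x) = true := by simp [hfc]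
          have hb2 : (f x == f c) = true := by simp [hfc]
          simp only [List.count_append, List.count_cons, List.count_nil, hb, if_true, hb2,
            Bool.not_true, Bool.false_and]
          simp only [beq_eq_false_iff_ne, ne_eq]
          omega
        · have hb : (f c == f x) = false := by
            simp only [beq_eq_false_iff_ne, ne_eq]
            intro h; exact hfc h.symm
          simp [List.count_append, List.count_cons, hb]
          exact fun _ => hfc
      rw [hcong, ← List.filter_filter, List.filter_map]
      rfl
    · -- the new key is fresh: its singleton group is appended at the end
      have hnotmem : f c ∉ PySem.Set.ofList (List.map f L) := fun h =>
        hmem ((PySem.Set.mem_ofList _ _).1 h)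
      rw [PySem.Set.add_of_not_mem hnotmem, List.filterMap_append]
      have hnil : List.filter (fun c' => f c' == f c) L = [] := by
        rw [List.filter_eq_nil_iff]
        intro a ha hbeq
        exact hmem (List.mem_map.2 ⟨a, ha, by simpa using hbeq⟩)
      have hsingle : List.filterMap (pvSingle (L ++ [c]) f) [f c] = [(f c, c)] := by
        simp [pvSingle, List.filter_append, hnil]
      have hagree : List.filterMap (pvSingle (L ++ [c]) f) (PySem.Set.ofList (List.map f L))
          = List.filterMap (pvSingle L f) (PySem.Set.ofList (List.map f L)) := by
        apply List.filterMap_congr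
        intro k hk
        have hkne : (f c == k) = false := by
          have : k ∈ List.map f L := (PySem.Set.mem_ofList _ _).1 hk
          simp only [beq_eq_false_iff_ne, ne_eq]
          intro h; exact hmem (h ▸ this)
        unfold pvSingle
        rw [List.filter_append]
        simp [hkne]
      rw [hagree, hsingle, ih]
      have hc0 : List.count (f c) (List.map f L) = 0 := List.count_eq_zero.2 hmem
      rw [List.filter_append]
      have htail : List.filter (fun c' => List.count (f c') (List.map f L ++ [f c]) == 1) [c] = [c] := by
        simp [List.count_append, List.count_cons, hc0]
      have hcong2 : List.filter (fun c' => List.count (f c') (List.map f L ++ [f c]) == 1) L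
          = List.filter (fun c' => List.count (f c') (List.map f L) == 1) L := by
        apply List.filter_congr
        intro x hx
        have hfc : (f c == f x) = false := by
          simp only [beq_eq_false_iff_ne, ne_eq]
          intro h; exact hmem (h.symm ▸ List.mem_map.2 ⟨x, hx, rfl⟩)
        simp [List.count_append, List.count_cons, hfc]
      rw [htail, hcong2, List.map_append]
      rfl

-- A's second loop, with the counts already known, keeps exactly the kept clients
-- whose first name is globally unique
lemma pv_pass2 (clients : List (List (String × String))) :
    (clients.foldl
      (fun (bf : PySem.Dict String (List (String × String))) c =>
        let name := PySem.Str.strip (((PySem.Dict.ofList c).get? "name").getD "")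
        if name == "" || !pyLooksLikePerson name then bf
        else
          let first := PySem.Str.lower ((PySem.Str.split₀ name).getD 0 "")
          if (clients.foldl pvCntF PySem.Dict.empty).getD first 0 == 1 then bf.insert first c
          else bf)
      PySem.Dict.empty).items
    = ((clients.filter pvKeep).filter
        (fun c => ((clients.filter pvKeep).map pvFirst).count (pvFirst c) == 1)).map
        (fun c => (pvFirst c, c)) := by
  have hbody : (fun (bf : PySem.Dict String (List (String × String))) c =>
        let name := PySem.Str.strip (((PySem.Dict.ofList c).get? "name").getD "")
        if name == "" || !pyLooksLikePerson name then bf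
        else
          let first := PySem.Str.lower ((PySem.Str.split₀ name).getD 0 "")
          if (clients.foldl pvCntF PySem.Dict.empty).getD first 0 == 1 then bf.insert first c
          else bf)
      = fun bf c => if pvKeep c then
          (if (((clients.filter pvKeep).map pvFirst).count (pvFirst c) == 1)
           then bf.insert (pvFirst c) c else bf) else bf := by
    funext bf c
    simp only [pvKeep, pvFirst, pvName, pv_cnt_getD]
    by_cases h1 : PySem.Str.strip (((PySem.Dict.ofList c).get? "name").getD "") == "" <;>
      by_cases h2 : pyLooksLikePerson
        (PySem.Str.strip (((PySem.Dict.ofList c).get? "name").getD "")) <;>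
      simp [h1, h2]
  rw [hbody, PySem.List.foldl_if_eq_foldl_filter, PySem.List.foldl_if_eq_foldl_filter]
  rw [PySem.Dict.items_foldl_insert_fresh _ pvFirst (fun c => c) _
        (by intro a _; rfl) (pv_uniq_nodup (clients.filter pvKeep))]
  rfl

-- B's singleton-group filtering, stated over the grouping characterisation
lemma pv_groupB (clients : List (List (String × String))) :
    (clients.foldl pvIdxF PySem.Dict.empty).items.filterMap
      (fun fg => match fg.2 with | [c] => some (fg.1, c) | _ => none)
    = (PySem.Set.ofList ((clients.filter pvKeep).map pvFirst)).filterMap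
        (pvSingle (clients.filter pvKeep) pvFirst) := by
  rw [PySem.Dict.items_eq_map_keys _ (pv_idx_nodup clients) []]
  rw [List.filterMap_map, pv_idx_keys]
  apply List.filterMap_congr
  intro k _
  simp only [Function.comp]
  rw [pv_idx_getD]
  rcases hfil : (clients.filter pvKeep).filter (fun c => pvFirst c == k) with _ | ⟨y, _ | ⟨z, t⟩⟩ <;>
    simp [pvSingle, hfil]


-- ===== VERDICT (by name: the statement is the Claim_ definition above) =====
theorem build_client_lookups_py_spec : Claim_equal_build_client_lookups_py := by
  intro clients _
  unfold Spec_build_client_lookups_py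
  unfold build_client_lookups_py build_client_lookups_py_alt
  rw [pv_foldA, pv_foldB]
  dsimp only
  rw [pv_pass2, pv_groupB, pv_core pvFirst (clients.filter pvKeep)]
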